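-- pv_equiv track=rewrite | github.com/cbram/ClusterRisk | src/csv_parser.py | _determine_security_type
-- ===== SOURCE A (Python) =====
-- def _determine_security_type(name: str, symbol: str) -> str:
--     """
--     Bestimmt den Typ eines Wertpapiers basierend auf Name und Symbol.
--     ETF-Erkennung zuerst, damit Geldmarkt-ETFs (XEON) und Commodity-ETCs (XGDU)
--     als ETF expandiert werden – der tatsächliche Typ kommt aus den ETF-Details.
--     """
--     name_upper = name.upper()
--     symbol_upper = symbol.upper() if symbol else ''
--
--     # ETF-Erkennung zuerst (inkl. XEON, XGDU – Typ aus ETF-Details)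
--     etf_keywords = [
--         'ETF', 'ETC', 'UCITS', 'INDEX FUND', 'TRACKER',
--         'ISHARES', 'ISHSIII', 'ISHS', 'EUNL', 'XEON', 'XGDU',
--         'VANGUARD', 'XTRACKERS', 'LYXOR', 'AMUNDI',
--         'SPDR', 'INVESCO', 'WISDOMTREE', 'FRANKLIN',
--         'MSCI WORLD', 'MSCI EM', 'MSCI EUROPE',
--         'S&P 500', 'NASDAQ', 'DAX', 'STOXX',
--     ]
--     if any(keyword in name_upper or keyword in symbol_upper for keyword in etf_keywords):
--         return 'ETF'
--
--     # Reine Cash-Konten (keine Wertpapiere)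
--     money_market_keywords = ['LIQUIDITÄT', 'TAGESGELD', 'OVERNIGHT', 'MONEY MARKET', 'GELDMARKT', 'CASH FUND']
--     if any(keyword in name_upper for keyword in money_market_keywords):
--         return 'Cash'
--
--     if 'GOLD' in name_upper or 'SILVER' in name_upper or 'COMMODITY' in name_upper:
--         return 'Commodity'
--     if 'BOND' in name_upper or 'ANLEIHE' in name_upper:
--         return 'Bond'
--     return 'Stock'
-- ===== SOURCE B (Python) =====
-- _RANKED_KEYWORDS = {}
-- for _rank, _kws in enumerate([
--     ['ETF', 'ETC', 'UCITS', 'INDEX FUND', 'TRACKER',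
--      'ISHARES', 'ISHSIII', 'ISHS', 'EUNL', 'XEON', 'XGDU',
--      'VANGUARD', 'XTRACKERS', 'LYXOR', 'AMUNDI',
--      'SPDR', 'INVESCO', 'WISDOMTREE', 'FRANKLIN',
--      'MSCI WORLD', 'MSCI EM', 'MSCI EUROPE',
--      'S&P 500', 'NASDAQ', 'DAX', 'STOXX'],
--     ['LIQUIDIT\u00c4T', 'TAGESGELD', 'OVERNIGHT', 'MONEY MARKET',
--      'GELDMARKT', 'CASH FUND'],
--     ['GOLD', 'SILVER', 'COMMODITY'],
--     ['BOND', 'ANLEIHE'],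
-- ]):
--     for _kw in _kws:
--         _RANKED_KEYWORDS[_kw] = _rank
--
-- _TYPES = ['ETF', 'Cash', 'Commodity', 'Bond', 'Stock']
--
--
-- def _determine_security_type(name: str, symbol: str) -> str:
--     name_upper = name.upper()
--     symbol_upper = symbol.upper() if symbol else ''
--     # Single flat pass: keep the best (lowest) precedence rank of any
--     # matching keyword; rank 0 (ETF) keywords also scan the symbol.
--     best = len(_TYPES) - 1  # 'Stock'
--     for kw, rank in _RANKED_KEYWORDS.items():
--         if rank < best and (kw in name_upper or (rank == 0 and kw in symbol_upper)):
--             best = rank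
--     return _TYPES[best]
-- ===== Notes on version B (the rewrite author's own statement) =====
-- stated objective: alternative
-- what changed: Replaces A's ordered early-return keyword-group cascade by a single flat pass over a keyword->precedence-rank map that accumulates the minimum matching rank (ETF-rank keywords also scan the symbol) and finally indexes a type table with it.
import Mathlib
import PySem

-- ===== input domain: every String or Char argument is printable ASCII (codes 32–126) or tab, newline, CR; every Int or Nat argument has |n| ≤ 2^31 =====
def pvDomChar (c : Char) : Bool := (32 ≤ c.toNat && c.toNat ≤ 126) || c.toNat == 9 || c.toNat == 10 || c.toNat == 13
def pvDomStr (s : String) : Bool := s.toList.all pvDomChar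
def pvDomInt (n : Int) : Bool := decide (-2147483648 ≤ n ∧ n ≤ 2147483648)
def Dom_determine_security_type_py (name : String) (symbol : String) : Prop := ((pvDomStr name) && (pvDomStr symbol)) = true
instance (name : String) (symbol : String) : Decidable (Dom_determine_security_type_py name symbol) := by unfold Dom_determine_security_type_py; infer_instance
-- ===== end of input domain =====

-- B replaces A's early-return keyword-group cascade by one flat minimum-rank pass over a keyword->rank map plus a type table (objective: alternative).


-- ===== PORT A =====
def pvEtfKeywords : List String :=
  ["ETF", "ETC", "UCITS", "INDEX FUND", "TRACKER",
   "ISHARES", "ISHSIII", "ISHS", "EUNL", "XEON", "XGDU",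
   "VANGUARD", "XTRACKERS", "LYXOR", "AMUNDI",
   "SPDR", "INVESCO", "WISDOMTREE", "FRANKLIN",
   "MSCI WORLD", "MSCI EM", "MSCI EUROPE",
   "S&P 500", "NASDAQ", "DAX", "STOXX"]

def pvMoneyMarketKeywords : List String :=
  ["LIQUIDITÄT", "TAGESGELD", "OVERNIGHT", "MONEY MARKET", "GELDMARKT", "CASH FUND"]

def determine_security_type_py (name : String) (symbol : String) : String :=
  let name_upper := PySem.Str.upper name
  let symbol_upper := if symbol ≠ "" then PySem.Str.upper symbol else ""
  if pvEtfKeywords.any (fun k => PySem.Str.isIn k name_upper || PySem.Str.isIn k symbol_upper) then "ETF"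
  else if pvMoneyMarketKeywords.any (fun k => PySem.Str.isIn k name_upper) then "Cash"
  else if PySem.Str.isIn "GOLD" name_upper || PySem.Str.isIn "SILVER" name_upper || PySem.Str.isIn "COMMODITY" name_upper then "Commodity"
  else if PySem.Str.isIn "BOND" name_upper || PySem.Str.isIn "ANLEIHE" name_upper then "Bond"
  else "Stock"

-- ===== PORT B =====
-- the keyword groups of Source B, in enumerate order (rank = group position)
def pvGroups : List (Nat × List String) :=
  [(0, ["ETF", "ETC", "UCITS", "INDEX FUND", "TRACKER",
        "ISHARES", "ISHSIII", "ISHS", "EUNL", "XEON", "XGDU",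
        "VANGUARD", "XTRACKERS", "LYXOR", "AMUNDI",
        "SPDR", "INVESCO", "WISDOMTREE", "FRANKLIN",
        "MSCI WORLD", "MSCI EM", "MSCI EUROPE",
        "S&P 500", "NASDAQ", "DAX", "STOXX"]),
   (1, ["LIQUIDITÄT", "TAGESGELD", "OVERNIGHT", "MONEY MARKET", "GELDMARKT", "CASH FUND"]),
   (2, ["GOLD", "SILVER", "COMMODITY"]),
   (3, ["BOND", "ANLEIHE"])]

-- _RANKED_KEYWORDS of Source B: the dict keyword -> rank in insertion order (all keywords distinct)
def pvRankedKeywords : List (String × Nat) :=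
  pvGroups.flatMap (fun g => g.2.map (fun kw => (kw, g.1)))

def pvTypes : List String := ["ETF", "Cash", "Commodity", "Bond", "Stock"]

-- the loop body of Source B: 'if rank < best and (kw in name_upper or (rank == 0 and kw in symbol_upper)): best = rank'
def pvBestStep (name_upper symbol_upper : String) (best : Nat) (p : String × Nat) : Nat :=
  if p.2 < best && (PySem.Str.isIn p.1 name_upper || (p.2 == 0 && PySem.Str.isIn p.1 symbol_upper)) then p.2 else best

def determine_security_type_py_alt (name : String) (symbol : String) : String :=
  let name_upper := PySem.Str.upper name
  let symbol_upper := if symbol ≠ "" then PySem.Str.upper symbol else ""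
  let best := pvRankedKeywords.foldl (pvBestStep name_upper symbol_upper) (pvTypes.length - 1)
  -- _TYPES[best]: best is always < 5, so plain positional getD is exact here
  pvTypes.getD best "Stock"

-- ===== PRECONDITION & SPEC =====
def Spec_determine_security_type_py (name : String) (symbol : String) (out : String) : Prop := out = determine_security_type_py_alt name symbol
instance (name : String) (symbol : String) (out : String) : Decidable (Spec_determine_security_type_py name symbol out) := by unfold Spec_determine_security_type_py; infer_instance

-- ===== CLAIM (what is proved, stated in full; the proofs are below) =====
def Claim_equal_determine_security_type_py : Prop := ∀ (name : String) (symbol : String), Dom_determine_security_type_py name symbol → Spec_determine_security_type_py name symbol (determine_security_type_py name symbol)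

-- ===== LEMMAS AND PROOFS =====
-- folding one rank-r keyword group updates the accumulator to r exactly when r improves it and some keyword matches
theorem pv_fold_group (nu su : String) (r : Nat) (kws : List String) (acc : Nat) :
    List.foldl (pvBestStep nu su) acc (kws.map (fun kw => (kw, r))) =
    if r < acc && kws.any (fun kw => PySem.Str.isIn kw nu || (r == 0 && PySem.Str.isIn kw su)) then r else acc := by
  induction kws generalizing acc with
  | nil => simp
  | cons kw rest ih =>
    simp only [List.map_cons, List.foldl_cons, List.any_cons]
    by_cases h2 : (PySem.Str.isIn kw nu || (r == 0 && PySem.Str.isIn kw su)) = true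
    · by_cases h1 : r < acc
      · have hs : pvBestStep nu su acc (kw, r) = r := by
          simp only [pvBestStep]; rw [if_pos (by rw [h2]; simp [h1])]
        rw [hs, ih r, if_neg (by simp), if_pos (by rw [h2]; simp [h1])]
      · have hs : pvBestStep nu su acc (kw, r) = acc := by
          simp only [pvBestStep]; rw [if_neg (by simp [h1])]
        rw [hs, ih acc, if_neg (by simp [h1]), if_neg (by simp [h1])]
    · simp only [Bool.not_eq_true] at h2
      have hs : pvBestStep nu su acc (kw, r) = acc := by
        simp only [pvBestStep]; rw [if_neg (by rw [h2]; simp)]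
      rw [hs, ih acc]
      by_cases h1 : r < acc
      · by_cases hr : (rest.any fun kw => PySem.Str.isIn kw nu || (r == 0 && PySem.Str.isIn kw su)) = true
        · rw [if_pos (by rw [hr]; simp [h1]), if_pos (by rw [hr, h2]; simp [h1])]
        · simp only [Bool.not_eq_true] at hr
          rw [if_neg (by rw [hr]; simp), if_neg (by rw [hr, h2]; simp)]
      · rw [if_neg (by simp [h1]), if_neg (by simp [h1])]

theorem pv_eq (name : String) (symbol : String) :
    determine_security_type_py name symbol = determine_security_type_py_alt name symbol := by
  unfold determine_security_type_py determine_security_type_py_alt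
  simp only [pvRankedKeywords, pvGroups, List.flatMap_cons, List.flatMap_nil, List.append_nil,
    List.foldl_append, pv_fold_group]
  rw [show (["ETF", "ETC", "UCITS", "INDEX FUND", "TRACKER",
        "ISHARES", "ISHSIII", "ISHS", "EUNL", "XEON", "XGDU",
        "VANGUARD", "XTRACKERS", "LYXOR", "AMUNDI",
        "SPDR", "INVESCO", "WISDOMTREE", "FRANKLIN",
        "MSCI WORLD", "MSCI EM", "MSCI EUROPE",
        "S&P 500", "NASDAQ", "DAX", "STOXX"] : List String) = pvEtfKeywords from rfl,
      show (["LIQUIDITÄT", "TAGESGELD", "OVERNIGHT", "MONEY MARKET", "GELDMARKT", "CASH FUND"] : List String)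
        = pvMoneyMarketKeywords from rfl]
  simp only [show ((0 : Nat) == 0) = true from rfl, show ((1 : Nat) == 0) = false from rfl,
    show ((2 : Nat) == 0) = false from rfl, show ((3 : Nat) == 0) = false from rfl,
    Bool.true_and, Bool.false_and, Bool.or_false, List.any_cons, List.any_nil, Bool.or_assoc]
  generalize PySem.Str.upper name = nu
  generalize (if symbol ≠ "" then PySem.Str.upper symbol else "") = su
  generalize (List.any pvEtfKeywords fun k => PySem.Str.isIn k nu || PySem.Str.isIn k su) = e
  generalize (List.any pvMoneyMarketKeywords fun k => PySem.Str.isIn k nu) = c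
  generalize (PySem.Str.isIn "GOLD" nu || (PySem.Str.isIn "SILVER" nu || PySem.Str.isIn "COMMODITY" nu)) = g
  generalize (PySem.Str.isIn "BOND" nu || PySem.Str.isIn "ANLEIHE" nu) = b
  cases e <;> cases c <;> cases g <;> cases b <;> rfl

-- ===== VERDICT (by name: the statement is the Claim_ definition above) =====
theorem determine_security_type_py_spec : Claim_equal_determine_security_type_py := by
  intro name symbol _
  exact pv_eq name symbol
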